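-- pv_equiv track=rewrite | github.com/VikramxD/Daifuku | scripts/ltx_inference.py | _convert_prompt_to_filename
-- ===== SOURCE A (Python) =====
-- def _convert_prompt_to_filename(text: str, max_len: int = 30) -> str:
--     """Convert prompt text to a valid filename"""
--     clean_text = "".join(
--         char.lower() for char in text if char.isalpha() or char.isspace()
--     )
--     words = clean_text.split()
--
--     result = []
--     current_length = 0
--
--     for word in words:
--         new_length = current_length + len(word)
--         if new_length <= max_len:
--             result.append(word)
--             current_length += len(word)
--         else:
--             break
--
--     return "-".join(result)
-- ===== SOURCE B (Python) =====
-- def _convert_prompt_to_filename(text: str, max_len: int = 30) -> str: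
--     """Convert prompt text to a valid filename"""
--     clean_text = "".join(
--         char.lower() for char in text if char.isalpha() or char.isspace()
--     )
--     words = clean_text.split()
--
--     # prefix sums: sums[k] = total length of the first k words
--     sums = [0]
--     for w in words:
--         sums.append(sums[-1] + len(w))
--
--     # binary search for the largest k with sums[k] <= max_len (sums is nondecreasing)
--     lo, hi = 0, len(words)
--     while lo < hi:
--         mid = (lo + hi + 1) // 2
--         if sums[mid] <= max_len:
--             lo = mid
--         else:
--             hi = mid - 1
--
--     return "-".join(words[:lo])
-- ===== Notes on version B (the rewrite author's own statement) =====
-- stated objective: alternative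
-- what changed: The stateful greedy accumulation loop (append word, track running length, break on overflow) is replaced by a two-phase pass: build the prefix-sum table of word lengths, then binary-search the largest cut index whose cumulative length fits max_len, and join that prefix.
import Mathlib
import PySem

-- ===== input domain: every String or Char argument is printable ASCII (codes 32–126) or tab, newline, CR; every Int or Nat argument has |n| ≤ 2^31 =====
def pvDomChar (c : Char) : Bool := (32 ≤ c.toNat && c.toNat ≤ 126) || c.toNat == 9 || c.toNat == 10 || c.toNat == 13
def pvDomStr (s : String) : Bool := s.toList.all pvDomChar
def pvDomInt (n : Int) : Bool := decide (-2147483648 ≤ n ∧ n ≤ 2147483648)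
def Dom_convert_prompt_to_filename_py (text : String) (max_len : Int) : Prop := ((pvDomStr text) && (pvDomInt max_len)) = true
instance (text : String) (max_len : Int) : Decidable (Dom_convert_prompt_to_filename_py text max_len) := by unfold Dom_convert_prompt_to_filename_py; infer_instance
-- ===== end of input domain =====

-- B replaces A's stateful greedy accumulation loop by a two-phase pass: build the
-- prefix-sum table of word lengths, then binary-search the cut point (objective:
-- alternative decomposition, same cost).

-- ===== PORT A =====

-- the greedy loop: for word in words: if current_length + len(word) <= max_len then append else break
def pvLoopA (max_len : Int) : List (List Char) → List (List Char) → Int → List (List Char)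
  | [], result, _ => result
  | w :: ws, result, cur =>
      if cur + (w.length : Int) ≤ max_len then pvLoopA max_len ws (result ++ [w]) (cur + (w.length : Int))
      else result

def convert_prompt_to_filename_py (text : String) (max_len : Int) : String :=
  let clean_text := (text.toList.filter (fun c => PySem.Chars.isalpha c || PySem.Chars.isspace c)).map PySem.Chars.lowerChar
  let words := PySem.Chars.split₀ clean_text
  String.mk (PySem.Chars.join ['-'] (pvLoopA max_len words [] 0))

-- ===== PORT B =====

-- the prefix-sum building loop: sums = [0]; for w in words: sums.append(sums[-1] + len(w))
def pvSumsB (words : List (List Char)) : List Int :=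
  words.foldl (fun acc w => acc ++ [acc.getLast! + (w.length : Int)]) [0]

-- while lo < hi: mid = (lo+hi+1)//2; if sums[mid] <= max_len: lo = mid else hi = mid-1
-- (getD's default 0 is never used: every mid accessed satisfies mid ≤ words.length < sums.length)
def pvBsr (sums : List Int) (max_len : Int) (lo hi : Nat) : Nat :=
  if lo < hi then
    let mid := (lo + hi + 1) / 2
    if sums.getD mid 0 ≤ max_len then pvBsr sums max_len mid hi
    else pvBsr sums max_len lo (mid - 1)
  else lo
termination_by hi - lo
decreasing_by all_goals omega

def convert_prompt_to_filename_py_alt (text : String) (max_len : Int) : String :=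
  let clean_text := (text.toList.filter (fun c => PySem.Chars.isalpha c || PySem.Chars.isspace c)).map PySem.Chars.lowerChar
  let words := PySem.Chars.split₀ clean_text
  let sums := pvSumsB words
  let lo := pvBsr sums max_len 0 words.length
  String.mk (PySem.Chars.join ['-'] (words.take lo))

-- ===== PRECONDITION & SPEC =====
def Spec_convert_prompt_to_filename_py (text : String) (max_len : Int) (out : String) : Prop := out = convert_prompt_to_filename_py_alt text max_len
instance (text : String) (max_len : Int) (out : String) : Decidable (Spec_convert_prompt_to_filename_py text max_len out) := by unfold Spec_convert_prompt_to_filename_py; infer_instance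

-- ===== CLAIM (what is proved, stated in full; the proofs are below) =====
def Claim_equal_convert_prompt_to_filename_py : Prop := ∀ (text : String) (max_len : Int), Dom_convert_prompt_to_filename_py text max_len → Spec_convert_prompt_to_filename_py text max_len (convert_prompt_to_filename_py text max_len)

-- ===== LEMMAS AND PROOFS =====

-- S ws k = total length of the first k words
def pvS (ws : List (List Char)) (k : Nat) : Int := ((ws.take k).map (fun w => (w.length : Int))).sum

-- greedy count: how many words A's loop keeps
def pvGcnt (max_len : Int) : List (List Char) → Int → Nat
  | [], _ => 0
  | w :: t, cur => if cur + (w.length : Int) ≤ max_len then pvGcnt max_len t (cur + (w.length : Int)) + 1 else 0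

theorem pvS_zero (ws : List (List Char)) : pvS ws 0 = 0 := rfl

theorem pvS_cons (w : List Char) (t : List (List Char)) (k : Nat) :
    pvS (w :: t) (k + 1) = (w.length : Int) + pvS t k := by
  simp [pvS, List.take_succ_cons]

theorem pvS_nonneg (ws : List (List Char)) (k : Nat) : 0 ≤ pvS ws k := by
  induction ws generalizing k with
  | nil => simp [pvS]
  | cons w t ih =>
    cases k with
    | zero => simp [pvS]
    | succ k => rw [pvS_cons]; have := ih k; positivity

theorem pvS_mono (ws : List (List Char)) (j k : Nat) (h : j ≤ k) : pvS ws j ≤ pvS ws k := by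
  induction ws generalizing j k with
  | nil => simp [pvS]
  | cons w t ih =>
    cases j with
    | zero =>
      cases k with
      | zero => exact le_refl _
      | succ k =>
        rw [pvS_zero, pvS_cons]
        have h1 := pvS_nonneg t k
        have h2 : (0:Int) ≤ (w.length : Int) := by positivity
        omega
    | succ j =>
      cases k with
      | zero => omega
      | succ k => rw [pvS_cons, pvS_cons]; have := ih j k (by omega); omega

-- A's loop with an accumulator prepends the accumulator
theorem pvLoopA_acc (m : Int) (ws : List (List Char)) (res : List (List Char)) (cur : Int) :
    pvLoopA m ws res cur = res ++ pvLoopA m ws [] cur := by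
  induction ws generalizing res cur with
  | nil => simp [pvLoopA]
  | cons w t ih =>
    by_cases h : cur + (w.length : Int) ≤ m
    · rw [pvLoopA, pvLoopA, if_pos h, if_pos h, ih (res ++ [w]), ih ([] ++ [w])]
      simp
    · rw [pvLoopA, pvLoopA, if_neg h, if_neg h]; simp

theorem pvLoopA_eq_take (m : Int) (ws : List (List Char)) (cur : Int) :
    pvLoopA m ws [] cur = ws.take (pvGcnt m ws cur) := by
  induction ws generalizing cur with
  | nil => simp [pvLoopA, pvGcnt]
  | cons w t ih =>
    by_cases h : cur + (w.length : Int) ≤ m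
    · rw [pvLoopA, if_pos h, pvGcnt, if_pos h, pvLoopA_acc, ih]
      simp [List.take_succ_cons]
    · rw [pvLoopA, if_neg h, pvGcnt, if_neg h]; simp

theorem pvGcnt_le_length (m : Int) (ws : List (List Char)) (cur : Int) :
    pvGcnt m ws cur ≤ ws.length := by
  induction ws generalizing cur with
  | nil => simp [pvGcnt]
  | cons w t ih =>
    rw [pvGcnt]
    split_ifs with h
    · have := ih (cur + (w.length : Int)); simp; omega
    · simp

theorem pvGcnt_sat (m : Int) (ws : List (List Char)) (cur : Int) (j : Nat)
    (h1 : 1 ≤ j) (h2 : j ≤ pvGcnt m ws cur) : cur + pvS ws j ≤ m := by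
  induction ws generalizing cur j with
  | nil => simp [pvGcnt] at h2; omega
  | cons w t ih =>
    rw [pvGcnt] at h2
    split_ifs at h2 with h
    · cases j with
      | zero => omega
      | succ j =>
        rw [pvS_cons]
        cases Nat.eq_zero_or_pos j with
        | inl hz => subst hz; rw [pvS_zero]; omega
        | inr hp =>
          have := ih (cur + (w.length : Int)) j hp (by omega)
          omega
    · omega

theorem pvGcnt_stop (m : Int) (ws : List (List Char)) (cur : Int)
    (h : pvGcnt m ws cur < ws.length) : ¬ (cur + pvS ws (pvGcnt m ws cur + 1) ≤ m) := by
  induction ws generalizing cur with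
  | nil => simp at h
  | cons w t ih =>
    rw [pvGcnt] at h ⊢
    split_ifs at h ⊢ with hb
    · rw [pvS_cons]
      have := ih (cur + (w.length : Int)) (by simpa using h)
      omega
    · rw [pvS_cons, pvS_zero]; omega

-- the tail of the prefix-sums list
def pvTailSums (c : Int) : List (List Char) → List Int
  | [] => []
  | w :: t => (c + (w.length : Int)) :: pvTailSums (c + (w.length : Int)) t

theorem pvSumsB_fold (ws : List (List Char)) (acc : List Int) (c : Int)
    (h : acc.getLast? = some c) :
    ws.foldl (fun acc w => acc ++ [acc.getLast! + (w.length : Int)]) acc = acc ++ pvTailSums c ws := by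
  induction ws generalizing acc c with
  | nil => simp [pvTailSums]
  | cons w t ih =>
    have hlast : acc.getLast! = c := by
      cases acc with
      | nil => simp at h
      | cons a l => simp [List.getLast!_eq_getLast?_getD, h]
    rw [List.foldl_cons, hlast,
        ih (acc ++ [c + (w.length : Int)]) (c + (w.length : Int)) (by simp)]
    simp [pvTailSums]

theorem pvSumsB_eq (ws : List (List Char)) : pvSumsB ws = 0 :: pvTailSums 0 ws := by
  rw [pvSumsB, pvSumsB_fold ws [0] 0 (by simp)]
  simp

theorem pvTailSums_getD (ws : List (List Char)) (c : Int) (j : Nat) (h : j < ws.length) :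
    (pvTailSums c ws).getD j 0 = c + pvS ws (j + 1) := by
  induction ws generalizing c j with
  | nil => simp at h
  | cons w t ih =>
    cases j with
    | zero => simp [pvTailSums, pvS_cons, pvS_zero]
    | succ j =>
      rw [pvTailSums, pvS_cons]
      simp only [List.getD_cons_succ]
      rw [ih _ j (by simpa using h)]
      ring

theorem pvSumsB_getD (ws : List (List Char)) (k : Nat) (h : k ≤ ws.length) :
    (pvSumsB ws).getD k 0 = pvS ws k := by
  rw [pvSumsB_eq]
  cases k with
  | zero => simp [pvS_zero]
  | succ k =>
    simp only [List.getD_cons_succ]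
    rw [pvTailSums_getD _ _ _ (by omega)]
    omega

-- binary-search correctness over a nondecreasing predicate
theorem pvBsr_correct (sums : List Int) (m : Int) (n : Nat)
    (mono : ∀ j k : Nat, j ≤ k → k ≤ n → sums.getD k 0 ≤ m → sums.getD j 0 ≤ m) :
    ∀ lo hi : Nat, lo ≤ hi → hi ≤ n →
    (lo = 0 ∨ sums.getD lo 0 ≤ m) →
    (∀ k : Nat, k ≤ n → sums.getD k 0 ≤ m → k ≤ hi) →
    (pvBsr sums m lo hi = 0 ∨ sums.getD (pvBsr sums m lo hi) 0 ≤ m) ∧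
    (∀ k : Nat, k ≤ n → sums.getD k 0 ≤ m → k ≤ pvBsr sums m lo hi) ∧
    lo ≤ pvBsr sums m lo hi ∧ pvBsr sums m lo hi ≤ hi := by
  intro lo hi
  induction lo, hi using pvBsr.induct sums m with
  | case1 lo hi hlt mid hmid ih =>
    have hmd : mid = (lo + hi + 1) / 2 := rfl
    intro _ hhn _ hhi
    rw [pvBsr, if_pos hlt]
    rw [← hmd, if_pos hmid]
    have hm1 : lo < mid := by omega
    have hm2 : mid ≤ hi := by omega
    have := ih (by omega) hhn (Or.inr hmid) hhi
    exact ⟨this.1, this.2.1, by omega, this.2.2.2⟩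
  | case2 lo hi hlt mid hmid ih =>
    have hmd : mid = (lo + hi + 1) / 2 := rfl
    intro _ hhn hlo hhi
    rw [pvBsr, if_pos hlt]
    rw [← hmd, if_neg hmid]
    have hm1 : lo < mid := by omega
    have hm2 : mid ≤ hi := by omega
    have hhi' : ∀ k : Nat, k ≤ n → sums.getD k 0 ≤ m → k ≤ mid - 1 := by
      intro k hk hkm
      by_contra hc
      exact hmid (mono mid k (by omega) hk hkm)
    have := ih (by omega) (by omega) hlo hhi'
    exact ⟨this.1, this.2.1, this.2.2.1, by omega⟩
  | case3 lo hi hlt =>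
    intro hle hhn hlo hhi
    rw [pvBsr, if_neg hlt]
    refine ⟨hlo, ?_, le_refl _, by omega⟩
    intro k hk hkm
    have := hhi k hk hkm
    omega

theorem pvBsr_eq_gcnt (m : Int) (ws : List (List Char)) :
    pvBsr (pvSumsB ws) m 0 ws.length = pvGcnt m ws 0 := by
  set n := ws.length with hn
  have mono : ∀ j k : Nat, j ≤ k → k ≤ n → (pvSumsB ws).getD k 0 ≤ m → (pvSumsB ws).getD j 0 ≤ m := by
    intro j k hjk hk h
    rw [pvSumsB_getD ws k hk] at h
    rw [pvSumsB_getD ws j (by omega)]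
    exact le_trans (pvS_mono ws j k hjk) h
  obtain ⟨h1, h2, h3, h4⟩ := pvBsr_correct (pvSumsB ws) m n mono 0 n (by omega) (le_refl _)
    (Or.inl rfl) (fun k hk _ => hk)
  set r := pvBsr (pvSumsB ws) m 0 n with hr
  have hg_le : pvGcnt m ws 0 ≤ r := by
    cases Nat.eq_zero_or_pos (pvGcnt m ws 0) with
    | inl h => omega
    | inr hp =>
      apply h2 _ (pvGcnt_le_length m ws 0)
      rw [pvSumsB_getD ws _ (pvGcnt_le_length m ws 0)]
      have := pvGcnt_sat m ws 0 (pvGcnt m ws 0) hp (le_refl _)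
      omega
  have hr_le : r ≤ pvGcnt m ws 0 := by
    by_contra hc
    have hgl : pvGcnt m ws 0 + 1 ≤ r := by omega
    have hlt : pvGcnt m ws 0 < n := by omega
    have hstop := pvGcnt_stop m ws 0 hlt
    cases h1 with
    | inl h => omega
    | inr h =>
      rw [pvSumsB_getD ws r h4] at h
      have := pvS_mono ws (pvGcnt m ws 0 + 1) r hgl
      omega
  omega

-- ===== VERDICT (by name: the statement is the Claim_ definition above) =====
theorem convert_prompt_to_filename_py_spec : Claim_equal_convert_prompt_to_filename_py := by
  intro text max_len _
  unfold Spec_convert_prompt_to_filename_py convert_prompt_to_filename_py convert_prompt_to_filename_py_alt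
  dsimp only
  rw [pvLoopA_eq_take, pvBsr_eq_gcnt]
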